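-- pv_equiv track=rewrite | github.com/TakaIshikawa/blueprint | src/blueprint/source_brief_diff.py | _ordered_fields
-- ===== SOURCE A (Python) =====
-- from typing import Any, Literal
--
-- SOURCE_BRIEF_FIELD_ORDER = (
--     "id",
--     "title",
--     "domain",
--     "summary",
--     "source_project",
--     "source_entity_type",
--     "source_id",
--     "source_payload",
--     "source_links",
--     "created_at",
--     "updated_at",
-- )
--
-- def _ordered_fields(
--     before: dict[str, Any],
--     after: dict[str, Any],
-- ) -> list[str]:
--     fields = set(before) | set(after)
--     ordered = [field_name for field_name in SOURCE_BRIEF_FIELD_ORDER if field_name in fields]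
--     ordered.extend(sorted(fields - set(SOURCE_BRIEF_FIELD_ORDER)))
--     return ordered
-- ===== SOURCE B (Python) =====
-- SOURCE_BRIEF_FIELD_ORDER = (
--     "id",
--     "title",
--     "domain",
--     "summary",
--     "source_project",
--     "source_entity_type",
--     "source_id",
--     "source_payload",
--     "source_links",
--     "created_at",
--     "updated_at",
-- )
--
-- _RANK = {name: i for i, name in enumerate(SOURCE_BRIEF_FIELD_ORDER)}
--
--
-- def _ordered_fields(before, after):
--     max_rank = len(SOURCE_BRIEF_FIELD_ORDER)
--     return sorted(set(before) | set(after), key=lambda f: (_RANK.get(f, max_rank), f))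
-- ===== Notes on version B (the rewrite author's own statement) =====
-- stated objective: simpler
-- what changed: Replaced A's two differently-shaped passes (a filter over the fixed field order plus a separately sorted extension of the leftover fields) by a single sort of the key union under one rank-table tuple key, with unknown fields ranked after all known ones and tie-broken alphabetically.
import Mathlib
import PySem

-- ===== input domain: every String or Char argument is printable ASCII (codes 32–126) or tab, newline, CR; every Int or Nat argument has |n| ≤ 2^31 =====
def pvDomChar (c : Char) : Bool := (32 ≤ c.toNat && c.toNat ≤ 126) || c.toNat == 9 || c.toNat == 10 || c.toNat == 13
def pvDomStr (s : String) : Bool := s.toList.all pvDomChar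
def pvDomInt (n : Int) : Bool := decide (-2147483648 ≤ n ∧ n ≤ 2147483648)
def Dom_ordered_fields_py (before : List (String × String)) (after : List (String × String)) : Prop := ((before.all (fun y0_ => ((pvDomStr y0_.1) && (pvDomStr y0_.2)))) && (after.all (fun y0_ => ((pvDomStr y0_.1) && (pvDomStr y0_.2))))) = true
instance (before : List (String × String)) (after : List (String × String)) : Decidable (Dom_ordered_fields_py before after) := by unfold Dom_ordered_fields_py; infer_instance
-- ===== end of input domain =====

-- B replaces A's two passes (filter over the fixed order + separately sorted leftovers)
-- by one sort of the key union under a rank-table tuple key; objective: simpler.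

-- SOURCE_BRIEF_FIELD_ORDER
def pvORDER : List String :=
  ["id", "title", "domain", "summary", "source_project", "source_entity_type",
   "source_id", "source_payload", "source_links", "created_at", "updated_at"]

-- ===== PORT A =====
def ordered_fields_py (before : List (String × String)) (after : List (String × String)) : List String :=
  let fields : PySem.Set String :=
    PySem.Set.union (PySem.Set.ofList (before.map Prod.fst)) (after.map Prod.fst)
  let ordered := pvORDER.filter (fun f => PySem.Set.contains fields f)
  ordered ++ PySem.List.sorted (PySem.Set.diff fields (PySem.Set.ofList pvORDER)) (fun x => x) false

-- ===== PORT B =====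
-- _RANK = {name: i for i, name in enumerate(SOURCE_BRIEF_FIELD_ORDER)}
def pvRANK : PySem.Dict String Int :=
  (PySem.List.enumerate pvORDER).foldl (fun d p => d.insert p.2 p.1) PySem.Dict.empty

-- the tuple key (rank, f) is ported as toLex (rank, f): the Lex order on ℤ × String is
-- exactly Python's lexicographic tuple comparison
def ordered_fields_py_alt (before : List (String × String)) (after : List (String × String)) : List String :=
  let union : PySem.Set String :=
    PySem.Set.union (PySem.Set.ofList (before.map Prod.fst)) (after.map Prod.fst)
  PySem.List.sorted union (fun f => toLex ((pvRANK.getD f 11 : Int), f)) false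

-- ===== PRECONDITION & SPEC =====
def Spec_ordered_fields_py (before : List (String × String)) (after : List (String × String)) (out : List String) : Prop := out = ordered_fields_py_alt before after
instance (before : List (String × String)) (after : List (String × String)) (out : List String) : Decidable (Spec_ordered_fields_py before after out) := by unfold Spec_ordered_fields_py; infer_instance

-- ===== CLAIM (what is proved, stated in full; the proofs are below) =====
def Claim_equal_ordered_fields_py : Prop := ∀ (before : List (String × String)) (after : List (String × String)), Dom_ordered_fields_py before after → Spec_ordered_fields_py before after (ordered_fields_py before after)

-- ===== LEMMAS AND PROOFS =====

def pvKey (f : String) : Lex (Int × String) := toLex ((pvRANK.getD f 11 : Int), f)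

theorem pvORDER_nodup : pvORDER.Nodup := by decide

theorem pvRANK_keys : pvRANK.keys = pvORDER := by decide

theorem rank_lt_of_mem {x : String} (hx : x ∈ pvORDER) : pvRANK.getD x 11 < 11 := by
  fin_cases hx <;> decide

theorem rank_eq_of_not_mem {x : String} (hx : x ∉ pvORDER) : pvRANK.getD x 11 = 11 := by
  apply PySem.Dict.getD_of_not_contains
  rw [PySem.Dict.contains_eq_decide_mem_keys, pvRANK_keys]
  simpa using hx

theorem pvORDER_pairwise_rank :
    pvORDER.Pairwise (fun a b => pvRANK.getD a 11 < pvRANK.getD b 11) := by decide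

theorem key_main (U : List String) (hU : U.Nodup) :
    PySem.List.sorted U pvKey false
      = pvORDER.filter (fun f => PySem.Set.contains U f)
        ++ PySem.List.sorted (PySem.Set.diff U (PySem.Set.ofList pvORDER)) (fun x => x) false := by
  have hdiffmem : ∀ x, x ∈ PySem.Set.diff U (PySem.Set.ofList pvORDER) ↔ x ∈ U ∧ x ∉ pvORDER := by
    intro x
    rw [PySem.Set.mem_diff, PySem.Set.mem_ofList]
  have hdiffnodup : (PySem.Set.diff U (PySem.Set.ofList pvORDER)).Nodup :=
    PySem.Set.nodup_diff _ _ hU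
  have hsortmem : ∀ x, x ∈ PySem.List.sorted (PySem.Set.diff U (PySem.Set.ofList pvORDER)) (fun x => x) false ↔ x ∈ U ∧ x ∉ pvORDER := by
    intro x; rw [PySem.List.mem_sorted, hdiffmem]
  have hfiltmem : ∀ x, x ∈ pvORDER.filter (fun f => PySem.Set.contains U f) ↔ x ∈ pvORDER ∧ x ∈ U := by
    intro x
    simp only [List.mem_filter, PySem.Set.contains_iff]
  apply PySem.List.sorted_eq_of_perm_of_pairwise_lt
  · -- permutation
    have hnodup : (pvORDER.filter (fun f => PySem.Set.contains U f)
        ++ PySem.List.sorted (PySem.Set.diff U (PySem.Set.ofList pvORDER)) (fun x => x) false).Nodup := by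
      rw [List.nodup_append]
      refine ⟨pvORDER_nodup.filter _, ((PySem.List.sorted_perm _ _ _).nodup_iff).mpr hdiffnodup, ?_⟩
      intro x hx y hy h
      exact (((hsortmem y).mp hy).2) (h ▸ ((hfiltmem x).mp hx).1)
    rw [List.perm_ext_iff_of_nodup hnodup hU]
    intro x
    rw [List.mem_append, hfiltmem, hsortmem]
    by_cases hx : x ∈ pvORDER <;> simp [hx]
  · -- pairwise strictly increasing keys
    rw [List.pairwise_append]
    refine ⟨?_, ?_, ?_⟩
    · refine List.Pairwise.imp_of_mem ?_ (pvORDER_pairwise_rank.filter _)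
      intro a b _ _ hab
      exact Prod.Lex.toLex_lt_toLex.mpr (Or.inl hab)
    · have hlt : (PySem.List.sorted (PySem.Set.diff U (PySem.Set.ofList pvORDER)) (fun x => x) false).Pairwise (· < ·) := by
        have := PySem.List.sorted_ofList_pairwise_lt (xs := PySem.Set.diff U (PySem.Set.ofList pvORDER))
        rwa [PySem.Set.ofList_eq_self_of_nodup _ hdiffnodup] at this
      refine List.Pairwise.imp_of_mem ?_ hlt
      intro a b ha hb hab
      have hra := rank_eq_of_not_mem ((hsortmem a).mp ha).2
      have hrb := rank_eq_of_not_mem ((hsortmem b).mp hb).2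
      exact Prod.Lex.toLex_lt_toLex.mpr (Or.inr ⟨by rw [hra, hrb], hab⟩)
    · intro a ha b hb
      have hra := rank_lt_of_mem ((hfiltmem a).mp ha).1
      have hrb := rank_eq_of_not_mem ((hsortmem b).mp hb).2
      exact Prod.Lex.toLex_lt_toLex.mpr (Or.inl (by rw [hrb]; exact hra))

-- ===== VERDICT (by name: the statement is the Claim_ definition above) =====
theorem ordered_fields_py_spec : Claim_equal_ordered_fields_py := by
  intro before after _
  unfold Spec_ordered_fields_py ordered_fields_py ordered_fields_py_alt
  have hU : (PySem.Set.union (PySem.Set.ofList (before.map Prod.fst)) (after.map Prod.fst)).Nodup :=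
    PySem.Set.nodup_union _ _ (PySem.Set.nodup_ofList _)
  exact (key_main _ hU).symm
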